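-- pv_equiv track=rewrite | github.com/pich-reamrachna/netguard | interfaces.py | auto_select_interface
-- ===== SOURCE A (Python) =====
-- def auto_select_interface(pairs):
--     priority = [
--         ["en0", "wi-fi", "wifi", "wlan0", "wlan"],
--         ["en1", "en2", "eth0", "eth1", "ethernet"],
--         ["lo0", "lo"],
--     ]
--     for keyword_list in priority:
--         for kw in keyword_list:
--             for display, scapy in pairs:
--                 if kw.lower() in display.lower() or kw.lower() in scapy.lower():
--                     return display, scapy
--     return pairs[0] if pairs else (None, None)
-- ===== SOURCE B (Python) =====
-- def auto_select_interface(pairs):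
--     keywords = ["en0", "wi-fi", "wifi", "wlan0", "wlan",
--                 "en1", "en2", "eth0", "eth1", "ethernet",
--                 "lo0", "lo"]
--
--     def rank(display, scapy):
--         d = display.lower()
--         s = scapy.lower()
--         r = 0
--         for kw in keywords:
--             if kw in d or kw in s:
--                 return r
--             r += 1
--         return r
--
--     best = None  # (rank, pair); strict '<' keeps the first pair of minimal rank
--     for display, scapy in pairs:
--         r = rank(display, scapy)
--         if best is None or r < best[0]:
--             best = (r, (display, scapy))
--     if best is None:
--         return (None, None)
--     return best[1]
-- ===== Notes on version B (the rewrite author's own statement) =====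
-- stated objective: alternative
-- what changed: A's triple nested keyword-first scan (priority tier, keyword, pair) is replaced by a single argmin pass over the pairs, scoring each pair by the index of the first keyword of the flattened priority list it matches (length of the list if none) and keeping the first pair of minimal rank, which also reproduces the pairs[0] fallback.
import Mathlib
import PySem

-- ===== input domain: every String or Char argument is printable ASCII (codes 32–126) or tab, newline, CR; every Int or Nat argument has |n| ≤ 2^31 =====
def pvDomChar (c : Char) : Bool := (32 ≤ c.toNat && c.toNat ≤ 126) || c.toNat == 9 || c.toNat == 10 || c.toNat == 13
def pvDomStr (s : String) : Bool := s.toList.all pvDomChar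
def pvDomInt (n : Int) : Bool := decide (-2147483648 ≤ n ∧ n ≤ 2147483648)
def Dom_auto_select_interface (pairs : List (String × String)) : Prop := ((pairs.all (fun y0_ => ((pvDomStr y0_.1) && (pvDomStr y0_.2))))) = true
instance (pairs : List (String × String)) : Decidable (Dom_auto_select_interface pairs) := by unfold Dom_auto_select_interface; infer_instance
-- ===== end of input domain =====

-- B replaces A's triple nested keyword-first search by a single argmin pass over the pairs keyed
-- by each pair's rank in the flattened keyword list (objective: alternative decomposition, same cost).

-- ===== PORT A =====
def pvPriorityA : List (List String) :=
  [["en0", "wi-fi", "wifi", "wlan0", "wlan"],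
   ["en1", "en2", "eth0", "eth1", "ethernet"],
   ["lo0", "lo"]]

-- inner 'for display, scapy in pairs' loop for one keyword
def pvGoPairsA (kw : String) : List (String × String) → Option (String × String)
  | [] => none
  | (d, s) :: rest =>
    if PySem.Str.isIn (PySem.Str.lower kw) (PySem.Str.lower d)
        || PySem.Str.isIn (PySem.Str.lower kw) (PySem.Str.lower s)
    then some (d, s) else pvGoPairsA kw rest

-- 'for kw in keyword_list' loop
def pvGoKwsA (pairs : List (String × String)) : List String → Option (String × String)
  | [] => none
  | kw :: rest =>
    match pvGoPairsA kw pairs with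
    | some p => some p
    | none => pvGoKwsA pairs rest

-- 'for keyword_list in priority' loop
def pvGoListsA (pairs : List (String × String)) : List (List String) → Option (String × String)
  | [] => none
  | l :: rest =>
    match pvGoKwsA pairs l with
    | some p => some p
    | none => pvGoListsA pairs rest

def auto_select_interface (pairs : List (String × String)) : Option String × Option String :=
  match pvGoListsA pairs pvPriorityA with
  | some (d, s) => (some d, some s)
  | none =>
    match pairs with
    | [] => (none, none)
    | (d, s) :: _ => (some d, some s)

-- ===== PORT B =====
def pvKeywordsB : List String :=
  ["en0", "wi-fi", "wifi", "wlan0", "wlan",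
   "en1", "en2", "eth0", "eth1", "ethernet",
   "lo0", "lo"]

-- B's 'rank' loop: r counts the keywords tried so far
def pvRankGo (d s : String) : List String → Nat → Nat
  | [], r => r
  | kw :: rest, r =>
    if PySem.Str.isIn kw d || PySem.Str.isIn kw s then r else pvRankGo d s rest (r + 1)

def pvRankB (display scapy : String) : Nat :=
  pvRankGo (PySem.Str.lower display) (PySem.Str.lower scapy) pvKeywordsB 0

-- one step of B's 'for display, scapy in pairs' argmin loop
def pvStepB (best : Option (Nat × (String × String))) (p : String × String) :
    Option (Nat × (String × String)) :=
  let r := pvRankB p.1 p.2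
  match best with
  | none => some (r, p)
  | some (r0, _) => if r < r0 then some (r, p) else best

def auto_select_interface_alt (pairs : List (String × String)) : Option String × Option String :=
  match pairs.foldl pvStepB none with
  | none => (none, none)
  | some (_, (d, s)) => (some d, some s)

-- ===== PRECONDITION & SPEC =====
def Spec_auto_select_interface (pairs : List (String × String)) (out : Option String × Option String) : Prop := out = auto_select_interface_alt pairs
instance (pairs : List (String × String)) (out : Option String × Option String) : Decidable (Spec_auto_select_interface pairs out) := by unfold Spec_auto_select_interface; infer_instance

-- ===== CLAIM (what is proved, stated in full; the proofs are below) =====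
def Claim_equal_auto_select_interface : Prop := ∀ (pairs : List (String × String)), Dom_auto_select_interface pairs → Spec_auto_select_interface pairs (auto_select_interface pairs)

-- ===== LEMMAS AND PROOFS =====

-- proof-layer clones: match predicate, rank, keyword-first search, running minimum
def pvMt (kw : String) (p : String × String) : Bool :=
  PySem.Str.isIn kw (PySem.Str.lower p.1) || PySem.Str.isIn kw (PySem.Str.lower p.2)

def pvRk : List String → (String × String) → Nat
  | [], _ => 0
  | kw :: rest, p => if pvMt kw p then 0 else pvRk rest p + 1

def pvSk : List String → List (String × String) → Option (String × String)
  | [], _ => none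
  | kw :: rest, pairs =>
    match pairs.find? (pvMt kw) with
    | some p => some p
    | none => pvSk rest pairs

def pvMn (kws : List String) (pairs : List (String × String)) (init : Nat) : Nat :=
  pairs.foldr (fun p m => min (pvRk kws p) m) init

theorem pvMn_nil (kws : List String) (r0 : Nat) : pvMn kws [] r0 = r0 := rfl

theorem pvMn_cons (kws : List String) (p : String × String) (t : List (String × String)) (r0 : Nat) :
    pvMn kws (p :: t) r0 = min (pvRk kws p) (pvMn kws t r0) := rfl

theorem pvRk_le (kws : List String) (p : String × String) : pvRk kws p ≤ kws.length := by
  induction kws with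
  | nil => simp [pvRk]
  | cons kw rest ih =>
    simp only [pvRk, List.length_cons]
    split <;> omega


theorem pvMn_le_init (kws : List String) (pairs : List (String × String)) (r0 : Nat) :
    pvMn kws pairs r0 ≤ r0 := by
  induction pairs with
  | nil => simp [pvMn_nil]
  | cons p t ih => rw [pvMn_cons]; omega


theorem pvMn_lower (kws : List String) (pairs : List (String × String)) {a r0 : Nat} (h : a ≤ r0) :
    min a (pvMn kws pairs r0) = pvMn kws pairs a := by
  induction pairs with
  | nil => simpa [pvMn_nil] using h
  | cons p t ih => rw [pvMn_cons, pvMn_cons, ← ih]; omega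


theorem pvMn_attain (kws : List String) (pairs : List (String × String)) (r0 : Nat)
    (h : pvMn kws pairs r0 ≠ r0) :
    ∃ q, pairs.find? (fun p => pvRk kws p == pvMn kws pairs r0) = some q := by
  induction pairs generalizing r0 with
  | nil => simp [pvMn_nil] at h
  | cons p t ih =>
    rw [pvMn_cons] at h ⊢
    by_cases hp : pvRk kws p = min (pvRk kws p) (pvMn kws t r0)
    · refine ⟨p, ?_⟩
      rw [List.find?_cons_of_pos]
      rw [← hp]; simp
    · have hle := pvMn_le_init kws t r0
      have hmin : min (pvRk kws p) (pvMn kws t r0) = pvMn kws t r0 := by omega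
      rw [hmin] at h ⊢
      obtain ⟨q, hq⟩ := ih r0 h
      refine ⟨q, ?_⟩
      rw [List.find?_cons_of_neg, hq]
      simp only [beq_iff_eq]
      omega


theorem pvMn_zero (kw : String) (rest : List String) (pairs : List (String × String)) (r0 : Nat)
    (q : String × String) (h : pairs.find? (pvMt kw) = some q) :
    pvMn (kw :: rest) pairs r0 = 0 := by
  induction pairs generalizing r0 with
  | nil => simp at h
  | cons p t ih =>
    rw [List.find?_cons] at h
    rw [pvMn_cons]
    by_cases hp : pvMt kw p = true
    · simp [pvRk, hp]
    · simp only [hp] at h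
      have := ih r0 h
      omega


theorem pvMn_succ (kw : String) (rest : List String) (pairs : List (String × String)) (r0 : Nat)
    (h : ∀ p ∈ pairs, pvMt kw p = false) :
    pvMn (kw :: rest) pairs (r0 + 1) = pvMn rest pairs r0 + 1 := by
  induction pairs generalizing r0 with
  | nil => simp [pvMn_nil]
  | cons p t ih =>
    have hp := h p (by simp)
    have ht := ih r0 (fun q hq => h q (List.mem_cons_of_mem _ hq))
    rw [pvMn_cons, pvMn_cons, ht]
    have hr : pvRk (kw :: rest) p = pvRk rest p + 1 := by simp [pvRk, hp]
    rw [hr]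
    omega


theorem pvFind?_congr {a : Type} (l : List a) (f g : a → Bool) (h : ∀ x ∈ l, f x = g x) :
    l.find? f = l.find? g := by
  induction l with
  | nil => rfl
  | cons x t ih =>
    rw [List.find?_cons, List.find?_cons, h x (by simp)]
    cases g x
    · exact ih (fun y hy => h y (List.mem_cons_of_mem _ hy))
    · rfl

-- characterization of A's keyword-first search as an argmin
theorem pvSk_char (kws : List String) (pairs : List (String × String)) :
    pvSk kws pairs =
      if pvMn kws pairs kws.length < kws.length
      then pairs.find? (fun p => pvRk kws p == pvMn kws pairs kws.length)
      else none := by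
  induction kws with
  | nil => simp [pvSk]
  | cons kw rest ih =>
    cases hfind : pairs.find? (pvMt kw) with
    | some q =>
      simp only [pvSk, hfind]
      have h0 := pvMn_zero kw rest pairs (kw :: rest).length q hfind
      rw [h0, if_pos (by simp)]
      have hpred : ∀ p ∈ pairs, pvMt kw p = (pvRk (kw :: rest) p == 0) := by
        intro p _
        by_cases h : pvMt kw p = true <;> simp [pvRk, h]
      rw [pvFind?_congr pairs _ _ hpred] at hfind
      exact hfind.symm
    | none =>
      simp only [pvSk, hfind]
      have hall : ∀ p ∈ pairs, pvMt kw p = false := by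
        intro p hp
        simpa using List.find?_eq_none.mp hfind p hp
      have hs := pvMn_succ kw rest pairs rest.length hall
      rw [ih]
      simp only [List.length_cons]
      rw [hs]
      by_cases hc : pvMn rest pairs rest.length < rest.length
      · rw [if_pos hc, if_pos (by omega)]
        apply pvFind?_congr
        intro p hp
        have hr : pvRk (kw :: rest) p = pvRk rest p + 1 := by simp [pvRk, hall p hp]
        simp [hr]
      · rw [if_neg hc, if_neg (by omega)]

-- bridges from the ports to the clones
theorem pvRankGo_eq (d s : String) (kws : List String) (r : Nat) :
    pvRankGo (PySem.Str.lower d) (PySem.Str.lower s) kws r = r + pvRk kws (d, s) := by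
  induction kws generalizing r with
  | nil => simp [pvRankGo, pvRk]
  | cons kw rest ih =>
    simp only [pvRankGo, pvRk, pvMt]
    by_cases h : (PySem.Str.isIn kw (PySem.Str.lower d) || PySem.Str.isIn kw (PySem.Str.lower s)) = true
    · rw [if_pos h, if_pos h]; omega
    · rw [if_neg h, if_neg h, ih (r + 1)]; omega

theorem pvRankB_eq (p : String × String) : pvRankB p.1 p.2 = pvRk pvKeywordsB p := by
  obtain ⟨d, s⟩ := p
  simp [pvRankB, pvRankGo_eq]

-- characterization of B's fold
theorem pvFold_char (t : List (String × String)) (r0 : Nat) (p0 : String × String) :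
    List.foldl pvStepB (some (r0, p0)) t =
      match t.find? (fun p => pvRk pvKeywordsB p == pvMn pvKeywordsB t r0) with
      | some q => if pvMn pvKeywordsB t r0 < r0 then some (pvMn pvKeywordsB t r0, q)
                  else some (r0, p0)
      | none => some (r0, p0) := by
  induction t generalizing r0 p0 with
  | nil => rfl
  | cons p t ih =>
    rw [List.foldl_cons]
    have hstep : pvStepB (some (r0, p0)) p =
        if pvRk pvKeywordsB p < r0 then some (pvRk pvKeywordsB p, p) else some (r0, p0) := by
      simp [pvStepB, pvRankB_eq]
    rw [hstep, pvMn_cons]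
    by_cases h1 : pvRk pvKeywordsB p < r0
    · rw [if_pos h1, ih (pvRk pvKeywordsB p) p]
      rw [pvMn_lower pvKeywordsB t (le_of_lt h1)]
      have hle : pvMn pvKeywordsB t (pvRk pvKeywordsB p) ≤ pvRk pvKeywordsB p :=
        pvMn_le_init pvKeywordsB t _
      by_cases h2 : pvRk pvKeywordsB p = pvMn pvKeywordsB t (pvRk pvKeywordsB p)
      · rw [List.find?_cons_of_pos (by simp [← h2])]
        cases t.find? (fun q => pvRk pvKeywordsB q == pvMn pvKeywordsB t (pvRk pvKeywordsB p)) with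
        | some q => simp [← h2, h1]
        | none => simp [← h2, h1]
      · obtain ⟨q, hq⟩ := pvMn_attain pvKeywordsB t (pvRk pvKeywordsB p) (by omega)
        rw [hq, List.find?_cons_of_neg (by simp only [beq_iff_eq]; omega), hq]
        have hlt : pvMn pvKeywordsB t (pvRk pvKeywordsB p) < pvRk pvKeywordsB p := by omega
        simp [hlt, lt_trans hlt h1]
    · rw [if_neg h1, ih r0 p0]
      have hle : pvMn pvKeywordsB t r0 ≤ r0 := pvMn_le_init pvKeywordsB t r0
      have hm : min (pvRk pvKeywordsB p) (pvMn pvKeywordsB t r0) = pvMn pvKeywordsB t r0 := by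
        omega
      rw [hm]
      by_cases h2 : pvRk pvKeywordsB p = pvMn pvKeywordsB t r0
      · have hm0 : pvMn pvKeywordsB t r0 = r0 := by omega
        rw [List.find?_cons_of_pos (by simp [h2])]
        cases t.find? (fun q => pvRk pvKeywordsB q == pvMn pvKeywordsB t r0) with
        | some q => simp [hm0]
        | none => simp [hm0]
      · rw [List.find?_cons_of_neg (by simp only [beq_iff_eq]; omega)]

theorem pvGoPairsA_eq (kw : String) (pairs : List (String × String)) :
    pvGoPairsA kw pairs = pairs.find? (pvMt (PySem.Str.lower kw)) := by
  induction pairs with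
  | nil => rfl
  | cons p t ih =>
    obtain ⟨d, s⟩ := p
    rw [List.find?_cons]
    simp only [pvGoPairsA, pvMt]
    by_cases h : (PySem.Str.isIn (PySem.Str.lower kw) (PySem.Str.lower d)
        || PySem.Str.isIn (PySem.Str.lower kw) (PySem.Str.lower s)) = true
    · rw [if_pos h, h]
    · rw [if_neg h, ih]
      have hb : (PySem.Str.isIn (PySem.Str.lower kw) (PySem.Str.lower d)
          || PySem.Str.isIn (PySem.Str.lower kw) (PySem.Str.lower s)) = false := by
        simpa using h
      rw [hb]

theorem pvGoKwsA_eq (pairs : List (String × String)) (kws : List String) :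
    pvGoKwsA pairs kws = pvSk (kws.map PySem.Str.lower) pairs := by
  induction kws with
  | nil => rfl
  | cons kw rest ih =>
    simp only [pvGoKwsA, List.map_cons, pvSk, pvGoPairsA_eq, ih]

theorem pvSk_append (k1 k2 : List String) (pairs : List (String × String)) :
    pvSk (k1 ++ k2) pairs =
      match pvSk k1 pairs with
      | some p => some p
      | none => pvSk k2 pairs := by
  induction k1 with
  | nil => simp [pvSk]
  | cons kw rest ih =>
    simp only [List.cons_append, pvSk, ih]
    cases pairs.find? (pvMt kw) <;> rfl

theorem pvGoListsA_eq (pairs : List (String × String)) :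
    pvGoListsA pairs pvPriorityA = pvSk pvKeywordsB pairs := by
  simp only [pvPriorityA, pvGoListsA, pvGoKwsA_eq]
  have e1 : ["en0", "wi-fi", "wifi", "wlan0", "wlan"].map PySem.Str.lower
      = ["en0", "wi-fi", "wifi", "wlan0", "wlan"] := by decide
  have e2 : ["en1", "en2", "eth0", "eth1", "ethernet"].map PySem.Str.lower
      = ["en1", "en2", "eth0", "eth1", "ethernet"] := by decide
  have e3 : ["lo0", "lo"].map PySem.Str.lower = ["lo0", "lo"] := by decide
  rw [e1, e2, e3]
  rw [show pvKeywordsB = ["en0", "wi-fi", "wifi", "wlan0", "wlan"]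
        ++ (["en1", "en2", "eth0", "eth1", "ethernet"] ++ ["lo0", "lo"]) from rfl,
      pvSk_append, pvSk_append]
  cases pvSk ["en0", "wi-fi", "wifi", "wlan0", "wlan"] pairs with
  | some p => rfl
  | none =>
    cases pvSk ["en1", "en2", "eth0", "eth1", "ethernet"] pairs with
    | some p => rfl
    | none => cases pvSk ["lo0", "lo"] pairs <;> rfl

-- ===== VERDICT (by name: the statement is the Claim_ definition above) =====
theorem auto_select_interface_spec : Claim_equal_auto_select_interface := by
  intro pairs _
  unfold Spec_auto_select_interface auto_select_interface auto_select_interface_alt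
  rw [pvGoListsA_eq, pvSk_char]
  cases pairs with
  | nil => rfl
  | cons p t =>
    rw [List.foldl_cons]
    have hstep0 : pvStepB none p = some (pvRk pvKeywordsB p, p) := by
      simp [pvStepB, pvRankB_eq]
    rw [hstep0, pvFold_char, pvMn_cons,
        pvMn_lower pvKeywordsB t (pvRk_le pvKeywordsB p)]
    have hle : pvMn pvKeywordsB t (pvRk pvKeywordsB p) ≤ pvRk pvKeywordsB p :=
      pvMn_le_init pvKeywordsB t _
    have hrle := pvRk_le pvKeywordsB p
    obtain ⟨pd, ps⟩ := p
    by_cases h2 : pvRk pvKeywordsB (pd, ps) = pvMn pvKeywordsB t (pvRk pvKeywordsB (pd, ps))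
    · rw [← h2]
      by_cases h3 : pvRk pvKeywordsB (pd, ps) < pvKeywordsB.length
      · rw [if_pos h3, List.find?_cons_of_pos (by simp)]
        cases t.find? (fun q => pvRk pvKeywordsB q == pvRk pvKeywordsB (pd, ps)) with
        | some q => simp
        | none => rfl
      · rw [if_neg h3]
        cases t.find? (fun q => pvRk pvKeywordsB q == pvRk pvKeywordsB (pd, ps)) with
        | some q => simp
        | none => rfl
    · obtain ⟨q, hq⟩ := pvMn_attain pvKeywordsB t (pvRk pvKeywordsB (pd, ps)) (by omega)
      rw [List.find?_cons_of_neg (by simp only [beq_iff_eq]; omega), hq]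
      have hlt : pvMn pvKeywordsB t (pvRk pvKeywordsB (pd, ps)) < pvRk pvKeywordsB (pd, ps) := by
        omega
      have hlt2 : pvMn pvKeywordsB t (pvRk pvKeywordsB (pd, ps)) < pvKeywordsB.length := by omega
      rw [if_pos hlt2]
      obtain ⟨qd, qs⟩ := q
      simp [hlt]
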